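-- pv_equiv track=rewrite | github.com/pancho43/pylibs | source/soporte.py | sublistIndexes
-- ===== SOURCE A (Python) =====
-- def isSubList(s, l, may=0):
--     if may:
--         return isSubList([x.upper() for x in s],
--                          [x.upper() for x in l])
--     else:
--         for x in s:
--             if x not in l:
--                 return False
--         return True
--
-- def sublistIndexes(s, l, may=0):
--     if not isSubList(s, l, may):
--         return []
--     if may:
--         return sublistIndexes([x.upper() for x in s],
--                               [x.upper() for x in l])
--     else:
--         return [l.index(x) for x in s]
-- ===== SOURCE B (Python) =====
-- def sublistIndexes(s, l, may=0):
--     if may: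
--         s = [x.upper() for x in s]
--         l = [x.upper() for x in l]
--     res = []
--     for x in s:
--         if x not in l:
--             return []
--         res.append(l.index(x))
--     return res
-- ===== Notes on version B (the rewrite author's own statement) =====
-- stated objective: simpler
-- what changed: Replaces the two recursive helpers and two full passes (membership check, then an index-mapping comprehension) with one early-exit loop over s that uppercases both lists up front instead of recursing on may.
import Mathlib
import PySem

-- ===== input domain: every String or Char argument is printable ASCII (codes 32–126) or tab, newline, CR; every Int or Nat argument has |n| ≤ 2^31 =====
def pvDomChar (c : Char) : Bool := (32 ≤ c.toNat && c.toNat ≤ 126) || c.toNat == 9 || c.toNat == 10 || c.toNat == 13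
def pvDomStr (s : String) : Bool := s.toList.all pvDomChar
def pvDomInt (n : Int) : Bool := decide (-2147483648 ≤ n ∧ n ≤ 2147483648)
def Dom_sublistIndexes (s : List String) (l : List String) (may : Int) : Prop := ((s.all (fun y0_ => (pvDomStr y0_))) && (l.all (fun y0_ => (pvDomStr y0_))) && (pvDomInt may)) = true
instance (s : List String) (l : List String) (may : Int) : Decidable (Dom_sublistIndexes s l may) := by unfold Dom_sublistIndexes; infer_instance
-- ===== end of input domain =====

-- B folds A's two recursive helpers and two passes into one early-exit loop (uppercasing up front); objective: simpler, same cost.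


-- ===== PORT A =====
-- the for-loop body of isSubList (may = 0 branch)
def isSubListLoop : List String → List String → Bool
  | [], _ => true
  | x :: xs, l => if ¬ l.contains x then false else isSubListLoop xs l

def isSubList (s : List String) (l : List String) (may : Int) : Bool :=
  if may ≠ 0 then
    isSubList (s.map PySem.Str.upper) (l.map PySem.Str.upper) 0
  else
    isSubListLoop s l
termination_by may.natAbs
decreasing_by omega

def sublistIndexes (s : List String) (l : List String) (may : Int) : List Int :=
  if ¬ isSubList s l may then []
  else if may ≠ 0 then
    sublistIndexes (s.map PySem.Str.upper) (l.map PySem.Str.upper) 0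
  else
    s.map (fun x => (((PySem.List.index? l x).getD 0 : Nat) : Int))
termination_by may.natAbs
decreasing_by omega

-- ===== PORT B =====
-- the single early-exit loop of B, accumulating res
def sliAltLoop (l : List String) : List String → List Int → List Int
  | [], acc => acc
  | x :: xs, acc =>
    if ¬ l.contains x then []
    else sliAltLoop l xs (acc ++ [(((PySem.List.index? l x).getD 0 : Nat) : Int)])

def sublistIndexes_alt (s : List String) (l : List String) (may : Int) : List Int :=
  if may ≠ 0 then
    sliAltLoop (l.map PySem.Str.upper) (s.map PySem.Str.upper) []
  else
    sliAltLoop l s []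

-- ===== PRECONDITION & SPEC =====
def Spec_sublistIndexes (s : List String) (l : List String) (may : Int) (out : List Int) : Prop := out = sublistIndexes_alt s l may
instance (s : List String) (l : List String) (may : Int) (out : List Int) : Decidable (Spec_sublistIndexes s l may out) := by unfold Spec_sublistIndexes; infer_instance

-- ===== CLAIM (what is proved, stated in full; the proofs are below) =====
def Claim_equal_sublistIndexes : Prop := ∀ (s : List String) (l : List String) (may : Int), Dom_sublistIndexes s l may → Spec_sublistIndexes s l may (sublistIndexes s l may)

-- ===== LEMMAS AND PROOFS =====
theorem sliAltLoop_eq (l : List String) (s : List String) (acc : List Int) :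
    sliAltLoop l s acc =
      if isSubListLoop s l then
        acc ++ s.map (fun x => (((PySem.List.index? l x).getD 0 : Nat) : Int))
      else [] := by
  induction s generalizing acc with
  | nil => simp [sliAltLoop, isSubListLoop]
  | cons x xs ih =>
    simp only [sliAltLoop, isSubListLoop]
    by_cases h : x ∈ l
    · simp [h, ih, List.append_assoc]
    · simp [h]

theorem sli_zero (s l : List String) :
    sublistIndexes s l 0 = sliAltLoop l s [] := by
  rw [sliAltLoop_eq, sublistIndexes, isSubList]
  cases hsl : isSubListLoop s l <;> simp [hsl]

-- ===== VERDICT (by name: the statement is the Claim_ definition above) =====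
theorem sublistIndexes_spec : Claim_equal_sublistIndexes := by
  intro s l may _
  unfold Spec_sublistIndexes sublistIndexes_alt
  by_cases hm : may = 0
  · simp [hm, sli_zero]
  · simp only [hm, ne_eq, not_false_eq_true, if_true]
    rw [sublistIndexes, isSubList]
    simp only [hm, ne_eq, not_false_eq_true, if_true]
    rw [← sli_zero, sublistIndexes]
    by_cases h : isSubList (s.map PySem.Str.upper) (l.map PySem.Str.upper) 0
    · simp [h]
    · simp [h]
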